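-- pv_equiv track=rewrite | github.com/jhester599/pgr-letters-archive | scripts/backfill_ex13.py | _trim_after_signature
-- ===== SOURCE A (Python) =====
-- def _trim_after_signature(text: str) -> str:
--     """Stop annual-report extraction after the CEO signature block when present."""
--     lines = text.splitlines()
--     signature_seen = False
--     for index, line in enumerate(lines):
--         normalized = line.strip().lower()
--         if normalized.startswith("/s/"):
--             signature_seen = True
--         if signature_seen and "chief executive officer" in normalized:
--             return "\n".join(lines[: index + 1]).strip()
--     return text.strip()
-- ===== SOURCE B (Python) =====
-- def _trim_after_signature(text: str) -> str:
--     """Stop annual-report extraction after the CEO signature block when present."""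
--     lines = text.splitlines()
--     norms = [line.strip().lower() for line in lines]
--     for i, norm in enumerate(norms):
--         if "chief executive officer" in norm and any(
--             m.startswith("/s/") for m in norms[: i + 1]
--         ):
--             return "\n".join(lines[: i + 1]).strip()
--     return text.strip()
-- ===== Notes on version B (the rewrite author's own statement) =====
-- stated objective: alternative
-- what changed: Replaced A's flag-threaded single pass with a candidate-driven search: the outer loop enumerates CEO-title lines and, for each candidate, an inner any() scan over the prefix of normalized lines decides whether a /s/ signature line precedes (or equals) it; no signature flag is carried across iterations.
import Mathlib
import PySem

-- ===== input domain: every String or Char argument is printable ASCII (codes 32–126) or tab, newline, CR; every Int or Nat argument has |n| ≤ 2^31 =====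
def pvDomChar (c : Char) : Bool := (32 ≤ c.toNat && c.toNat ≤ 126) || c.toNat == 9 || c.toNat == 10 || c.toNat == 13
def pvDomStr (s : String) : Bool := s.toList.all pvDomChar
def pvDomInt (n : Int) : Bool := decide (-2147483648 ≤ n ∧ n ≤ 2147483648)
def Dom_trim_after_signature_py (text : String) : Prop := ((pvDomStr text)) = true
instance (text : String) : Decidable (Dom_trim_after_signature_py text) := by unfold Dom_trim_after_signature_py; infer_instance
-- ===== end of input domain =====

-- B replaces A's flag-threaded single pass by a candidate-driven search: enumerate
-- CEO-title lines and test each candidate's prefix for a /s/ line (alternative decomposition).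

-- ===== PORT A =====
-- the loop of A: index counter, signature_seen flag, remaining lines
def trimLoopA (text : String) (lines : List String) : Nat → Bool → List String → String
  | _, _, [] => PySem.Str.strip text
  | i, seen, l :: rest =>
      let normalized := PySem.Str.lower (PySem.Str.strip l)
      let seen' := if PySem.Str.startswith normalized "/s/" then true else seen
      if seen' && PySem.Str.isIn "chief executive officer" normalized then
        PySem.Str.strip (PySem.Str.join "\n" (lines.take (i + 1)))
      else
        trimLoopA text lines (i + 1) seen' rest

def trim_after_signature_py (text : String) : String :=
  let lines := PySem.Str.splitlines text
  trimLoopA text lines 0 false lines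

-- ===== PORT B =====
-- Source B's outer loop: enumerate the normalized lines; at each CEO candidate i run
-- the inner any() scan over norms[: i + 1]
def trimLoopB (text : String) (lines : List String) (norms : List String) : Nat → List String → String
  | _, [] => PySem.Str.strip text
  | i, n :: rest =>
      if PySem.Str.isIn "chief executive officer" n &&
         (norms.take (i + 1)).any (fun m => PySem.Str.startswith m "/s/") then
        PySem.Str.strip (PySem.Str.join "\n" (lines.take (i + 1)))
      else
        trimLoopB text lines norms (i + 1) rest

def trim_after_signature_py_alt (text : String) : String :=
  let lines := PySem.Str.splitlines text
  let norms := lines.map (fun l => PySem.Str.lower (PySem.Str.strip l))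
  trimLoopB text lines norms 0 norms

-- ===== PRECONDITION & SPEC =====
def Spec_trim_after_signature_py (text : String) (out : String) : Prop := out = trim_after_signature_py_alt text
instance (text : String) (out : String) : Decidable (Spec_trim_after_signature_py text out) := by unfold Spec_trim_after_signature_py; infer_instance

-- ===== CLAIM =====
def Claim_equal_trim_after_signature_py : Prop := ∀ (text : String), Dom_trim_after_signature_py text → Spec_trim_after_signature_py text (trim_after_signature_py text)

-- ===== LEMMAS AND PROOFS =====

-- A's flag at step i equals B's inner any() over the prefix of normalized lines:
-- with that invariant the two loops coincide step by step.
theorem loops_eq (text : String) (lines : List String) :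
    ∀ (restL : List String) (i : Nat), lines.drop i = restL →
      trimLoopA text lines i
          (((lines.take i).map (fun l => PySem.Str.lower (PySem.Str.strip l))).any
            (fun m => PySem.Str.startswith m "/s/"))
          restL
        = trimLoopB text lines (lines.map (fun l => PySem.Str.lower (PySem.Str.strip l))) i
            (restL.map (fun l => PySem.Str.lower (PySem.Str.strip l))) := by
  intro restL
  induction restL with
  | nil => intro i _; simp only [List.map_nil, trimLoopA, trimLoopB]
  | cons l rest ih =>
      intro i hdrop
      have hget : lines[i]? = some l := by
        have : (lines.drop i)[0]? = lines[i]? := by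
          rw [List.getElem?_drop]; norm_num
        rw [← this, hdrop]; rfl
      have htake : lines.take (i + 1) = lines.take i ++ [l] := by
        rw [List.take_add_one, hget]; rfl
      have hdrop' : lines.drop (i + 1) = rest := by
        have : lines.drop (i + 1) = (lines.drop i).drop 1 := by
          rw [List.drop_drop]
        rw [this, hdrop]; rfl
      simp only [List.map_cons, trimLoopA, trimLoopB]
      set f := fun l => PySem.Str.lower (PySem.Str.strip l) with hf
      set sig := fun m => PySem.Str.startswith m "/s/" with hsig
      have hpref : ((lines.map f).take (i + 1)).any sig
          = (((lines.take i).map f).any sig || sig (f l)) := by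
        rw [← List.map_take, htake]
        simp [List.any_append]
      have hseen' :
          (if sig (f l) then true else ((lines.take i).map f).any sig)
            = (((lines.take i).map f).any sig || sig (f l)) := by
        by_cases h : sig (f l) = true
        · simp [h]
        · simp [h]
      rw [hseen', hpref]
      by_cases hc : ((((lines.take i).map f).any sig || sig (f l)) &&
          PySem.Str.isIn "chief executive officer" (f l)) = true
      · rw [if_pos hc, if_pos (by rw [Bool.and_comm] at hc; exact hc)]
      · rw [if_neg hc, if_neg (by rw [Bool.and_comm] at hc; exact hc)]
        have hstep : ((lines.take (i + 1)).map f).any sig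
            = (((lines.take i).map f).any sig || sig (f l)) := by
          rw [htake]; simp [List.any_append]
        rw [← hstep]
        exact ih (i + 1) hdrop'

-- ===== VERDICT =====
theorem trim_after_signature_py_spec : Claim_equal_trim_after_signature_py := by
  intro text _
  unfold Spec_trim_after_signature_py trim_after_signature_py trim_after_signature_py_alt
  have := loops_eq text (PySem.Str.splitlines text) (PySem.Str.splitlines text) 0 rfl
  simpa using this
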